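-- pv_equiv track=rewrite | github.com/AnasImloul/Leetcode-Solutions | scripts/algorithms/D/Decode the Slanted Ciphertext/Decode the Slanted Ciphertext.py | decodeCiphertext
-- ===== SOURCE A (Python) =====
-- def decodeCiphertext(encodedText: str, rows: int) -> str:
--     n = len(encodedText)
--     cols = n // rows
--     step = cols + 1
--     res = ""
--
--     for i in range(cols):
--         for j in range(i, n, step):
--             res += encodedText[j]
--
--     return res.rstrip()
-- ===== SOURCE B (Python) =====
-- def decodeCiphertext(encodedText: str, rows: int) -> str:
--     n = len(encodedText)
--     cols = n // rows
--     if cols <= 0: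
--         return ""
--     step = cols + 1
--     buckets = [[] for _ in range(cols)]
--     for j, ch in enumerate(encodedText):
--         r = j % step
--         if r < cols:
--             buckets[r].append(ch)
--     return "".join("".join(b) for b in buckets).rstrip()
-- ===== Notes on version B (the rewrite author's own statement) =====
-- stated objective: alternative
-- what changed: B replaces A's nested diagonal stepping (outer loop over diagonals, inner loop jumping by step) with one linear pass over enumerate(encodedText) that drops each character into a per-diagonal bucket keyed by index mod step, then concatenates the buckets.
import Mathlib
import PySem

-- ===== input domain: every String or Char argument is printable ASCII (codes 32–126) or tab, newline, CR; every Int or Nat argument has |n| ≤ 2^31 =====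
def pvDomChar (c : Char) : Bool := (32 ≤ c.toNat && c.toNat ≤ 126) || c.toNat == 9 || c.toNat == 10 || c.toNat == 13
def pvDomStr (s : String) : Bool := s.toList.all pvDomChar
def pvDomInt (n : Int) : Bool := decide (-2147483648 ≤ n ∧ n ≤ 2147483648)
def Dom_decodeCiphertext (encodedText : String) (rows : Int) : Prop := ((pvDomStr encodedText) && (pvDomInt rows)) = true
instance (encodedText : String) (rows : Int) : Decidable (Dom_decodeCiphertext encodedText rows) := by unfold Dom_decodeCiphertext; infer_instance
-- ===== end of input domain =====

-- B reads the ciphertext in ONE linear pass, bucketing each character by its index mod (cols+1),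
-- instead of A's nested per-diagonal stepping loops; equal return value proved for rows ≠ 0.


-- ===== PORT A =====
-- 'res += encodedText[j]' (index always in range when the loop body runs)
def aChar (l : List Char) (j : Int) : List Char :=
  (PySem.List.pyGet? l j).elim [] (fun c => [c])

def decodeCiphertext (encodedText : String) (rows : Int) : String :=
  let l := encodedText.toList
  let n : Int := PySem.List.len l
  let cols : Int := PySem.Int.floordiv n rows
  let step : Int := cols + 1
  let res : List Char :=
    (PySem.List.pyRange 0 cols 1).foldl (fun res i =>
      (PySem.List.pyRange i n step).foldl (fun res j => res ++ aChar l j) res) []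
  String.ofList (PySem.Chars.rstrip res)

-- ===== PORT B =====
-- loop body: r = j % step; if r < cols: buckets[r].append(ch)
def altStep (step cols : Int) (bs : List (List Char)) (jc : Int × Char) : List (List Char) :=
  let r := PySem.Int.mod jc.1 step
  if r < cols then bs.modify r.toNat (· ++ [jc.2]) else bs

def decodeCiphertext_alt (encodedText : String) (rows : Int) : String :=
  let l := encodedText.toList
  let n : Int := PySem.List.len l
  let cols : Int := PySem.Int.floordiv n rows
  if cols ≤ 0 then "" else
    let step : Int := cols + 1
    let buckets0 : List (List Char) := (PySem.List.pyRange 0 cols 1).map (fun _ => [])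
    let buckets := (PySem.List.enumerate l).foldl (altStep step cols) buckets0
    String.ofList (PySem.Chars.rstrip buckets.flatten)

-- ===== PRECONDITION & SPEC =====
-- Pre_ excludes exactly rows = 0, where Python's 'n // rows' raises ZeroDivisionError (in both A and B).
def Pre_decodeCiphertext (_encodedText : String) (rows : Int) : Prop := rows ≠ 0
instance (encodedText : String) (rows : Int) : Decidable (Pre_decodeCiphertext encodedText rows) := by unfold Pre_decodeCiphertext; infer_instance

def pvWitness_decodeCiphertext : String × Int := ("abcdefghij", 3)

def Spec_decodeCiphertext (encodedText : String) (rows : Int) (out : String) : Prop := out = decodeCiphertext_alt encodedText rows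
instance (encodedText : String) (rows : Int) (out : String) : Decidable (Spec_decodeCiphertext encodedText rows out) := by unfold Spec_decodeCiphertext; infer_instance

-- ===== CLAIM (what is proved, stated in full; the proofs are below) =====
def Claim_equal_decodeCiphertext : Prop := ∀ (encodedText : String) (rows : Int), Dom_decodeCiphertext encodedText rows → Pre_decodeCiphertext encodedText rows → Spec_decodeCiphertext encodedText rows (decodeCiphertext encodedText rows)

-- ===== LEMMAS AND PROOFS =====

-- two strictly increasing integer lists with the same members are equal
theorem eq_of_pairwise_lt_of_mem_iff (l1 l2 : List Int) (h1 : l1.Pairwise (· < ·))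
    (h2 : l2.Pairwise (· < ·)) (h : ∀ x, x ∈ l1 ↔ x ∈ l2) : l1 = l2 :=
  (List.perm_of_nodup_nodup_toFinset_eq h1.nodup h2.nodup
      (by ext x; simp [List.mem_toFinset, h x])).eq_of_pairwise
    (by intro a b _ _ hab hba; exact absurd (lt_trans hab hba) (lt_irrefl a)) h1 h2

-- Python's j % step picks out exactly the residue class, for 0 ≤ i < step
theorem mod_eq_iff_dvd_sub (step i x : Int) (hstep : 0 < step) (hi0 : 0 ≤ i) (hi : i < step) :
    PySem.Int.mod x step = i ↔ step ∣ x - i := by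
  have hid := PySem.Int.floordiv_mul_add_mod x step
  have h0 := PySem.Int.mod_nonneg x hstep
  have h1 := PySem.Int.mod_lt x hstep
  constructor
  · intro h
    exact ⟨PySem.Int.floordiv x step, by linarith [hid]⟩
  · rintro ⟨t, ht⟩
    have key : PySem.Int.mod x step - i = (t - PySem.Int.floordiv x step) * step := by
      linear_combination hid + ht
    set u := t - PySem.Int.floordiv x step with hu
    rcases lt_trichotomy u 0 with hc | hc | hc
    · have : u * step ≤ (-1) * step := mul_le_mul_of_nonneg_right (by omega) (le_of_lt hstep)
      linarith
    · rw [hc, zero_mul] at key; omega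
    · have : 1 * step ≤ u * step := mul_le_mul_of_nonneg_right (by omega) (le_of_lt hstep)
      linarith

-- A's inner range is the filter of all indices by residue class
theorem pyRange_eq_filter_mod (n i step : Int) (hstep : 0 < step) (hi0 : 0 ≤ i) (hi : i < step) :
    PySem.List.pyRange i n step
      = (PySem.List.pyRange 0 n 1).filter (fun j => PySem.Int.mod j step == i) := by
  apply eq_of_pairwise_lt_of_mem_iff
  · rw [PySem.List.pyRange_of_pos _ _ hstep]
    exact (List.pairwise_lt_range).map _ (fun a b hab => by nlinarith)
  · exact (PySem.List.pairwise_lt_pyRange_one 0 n).filter _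
  · intro x
    rw [List.mem_filter, PySem.List.mem_pyRange_iff_of_pos hstep, PySem.List.mem_pyRange_one,
      beq_iff_eq, mod_eq_iff_dvd_sub step i x hstep hi0 hi]
    constructor
    · rintro ⟨ha, hb, hc⟩; exact ⟨⟨by omega, hb⟩, hc⟩
    · rintro ⟨⟨ha, hb⟩, hc⟩
      refine ⟨?_, hb, hc⟩
      obtain ⟨t, ht⟩ := hc
      rcases le_or_gt 0 t with h' | h'
      · have : 0 ≤ step * t := mul_nonneg (le_of_lt hstep) h'
        linarith
      · have : step * t ≤ step * (-1) := mul_le_mul_of_nonneg_left (by omega) (le_of_lt hstep)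
        linarith

-- per-diagonal: A's inner loop output is B's bucket content
theorem diag_eq (l : List Char) (step i : Int) (hstep : 0 < step) (hi0 : 0 ≤ i) (hi : i < step) :
    (PySem.List.pyRange i (PySem.List.len l) step).flatMap (aChar l)
      = ((PySem.List.enumerate l).filter (fun jc => PySem.Int.mod jc.1 step == i)).map (·.2) := by
  rw [PySem.List.enumerate_eq_map_pyRange l 'a', List.filter_map, List.map_map]
  rw [show ((fun jc : Int × Char => PySem.Int.mod jc.1 step == i) ∘ fun j => (j, PySem.List.pyGetD l j 'a'))
        = (fun j => PySem.Int.mod j step == i) from rfl]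
  rw [← pyRange_eq_filter_mod _ i step hstep hi0 hi, List.flatMap_def]
  rw [List.map_congr_left (g := fun j => [PySem.List.pyGetD l j 'a']) ?_, ← List.flatMap_def,
    ← List.map_eq_flatMap]
  · rfl
  · intro j hj
    rw [PySem.List.mem_pyRange_iff_of_pos hstep] at hj
    obtain ⟨hj1, hj2, -⟩ := hj
    have hj0 : 0 ≤ j := le_trans hi0 hj1
    have hjn : j.toNat < l.length := by simp [PySem.List.len] at hj2; omega
    simp [aChar, PySem.List.pyGet?_of_nonneg l hj0, PySem.List.pyGetD_of_nonneg l 'a' hj0,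
      List.getElem?_eq_getElem hjn, List.getD]

-- B's fold preserves the number of buckets
theorem bfold_length (step cols : Int) (xs : List (Int × Char)) (bs : List (List Char)) :
    (xs.foldl (altStep step cols) bs).length = bs.length := by
  induction xs generalizing bs with
  | nil => rfl
  | cons p t ih =>
    rw [List.foldl_cons, ih]
    simp only [altStep]
    split <;> simp [List.length_modify]

-- B's fold fills bucket k with exactly the characters whose index is ≡ k (mod step)
theorem bfold_getElem? (step cols : Int) (hstep : 0 < step) (xs : List (Int × Char))
    (bs : List (List Char)) (k : Nat) (hk : (k : Int) < cols) :
    (xs.foldl (altStep step cols) bs)[k]?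
      = bs[k]?.map (fun b => b ++ (xs.filter (fun jc => PySem.Int.mod jc.1 step == (k : Int))).map (·.2)) := by
  induction xs generalizing bs with
  | nil => cases h : bs[k]? <;> simp [h]
  | cons p t ih =>
    rw [List.foldl_cons, ih]
    have h0 : 0 ≤ PySem.Int.mod p.1 step := PySem.Int.mod_nonneg p.1 hstep
    simp only [altStep]
    by_cases hr : PySem.Int.mod p.1 step < cols
    · rw [if_pos hr]
      by_cases he : PySem.Int.mod p.1 step = (k : Int)
      · have hnat : (PySem.Int.mod p.1 step).toNat = k := by omega
        rw [List.getElem?_modify, hnat, List.filter_cons_of_pos (by simp [he])]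
        cases h : bs[k]? <;> simp
      · have hnat : (PySem.Int.mod p.1 step).toNat ≠ k := by omega
        rw [List.getElem?_modify, List.filter_cons_of_neg (by simp [he])]
        cases h : bs[k]? <;> simp [hnat]
    · rw [if_neg hr, List.filter_cons_of_neg (by simp; omega)]

-- the core list identity between the two ports, for 0 < cols
theorem core_eq (l : List Char) (cols : Int) (hcols : 0 < cols) :
    (PySem.List.pyRange 0 cols 1).foldl (fun res i =>
        (PySem.List.pyRange i (PySem.List.len l) (cols + 1)).foldl (fun res j => res ++ aChar l j) res) []
      = ((PySem.List.enumerate l).foldl (altStep (cols + 1) cols)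
          ((PySem.List.pyRange 0 cols 1).map (fun _ => []))).flatten := by
  have hstep : (0 : Int) < cols + 1 := by omega
  have hC : ((cols.toNat : Int)) = cols := Int.toNat_of_nonneg (le_of_lt hcols)
  -- rewrite A's nested folds as a flatMap of flatMaps
  simp only [PySem.List.foldl_append_eq_flatMap, List.nil_append]
  -- identify B's final bucket list
  have hbuck : (PySem.List.enumerate l).foldl (altStep (cols + 1) cols)
        ((PySem.List.pyRange 0 cols 1).map (fun _ => []))
      = (List.range cols.toNat).map (fun (k : Nat) =>
          ((PySem.List.enumerate l).filter (fun jc => PySem.Int.mod jc.1 (cols + 1) == ((k : Nat) : Int))).map (·.2)) := by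
    apply List.ext_getElem?
    intro k
    by_cases hk : k < cols.toNat
    · rw [bfold_getElem? _ _ hstep _ _ k (by omega)]
      have h0 : ((PySem.List.pyRange 0 cols 1).map (fun _ => ([] : List Char)))[k]? = some [] := by
        have := PySem.List.getElem?_map_pyRange_zero (fun _ => ([] : List Char)) cols.toNat k hk
        rwa [hC] at this
      rw [h0, List.getElem?_map, List.getElem?_range hk]
      simp
    · rw [List.getElem?_eq_none, List.getElem?_eq_none]
      · simpa using hk
      · rw [bfold_length, List.length_map, PySem.List.length_pyRange_one]; omega
  rw [hbuck, ← List.flatMap_def]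
  -- A's outer range as a Nat range
  rw [PySem.List.pyRange_one 0 cols, List.flatMap_map,
    show ((cols : Int) - 0).toNat = cols.toNat from by rw [Int.sub_zero],
    List.flatMap_def, List.flatMap_def]
  congr 1
  apply List.map_congr_left
  intro k hk
  rw [List.mem_range] at hk
  have hkc : (k : Int) < cols := by omega
  have := diag_eq l (cols + 1) (k : Int) hstep (by positivity) (by omega)
  simpa [Function.comp] using this

-- ===== VERDICT (by name: the statement is the Claim_ definition above) =====
theorem decodeCiphertext_spec : Claim_equal_decodeCiphertext := by
  intro s rows _ hpre
  simp only [Spec_decodeCiphertext, decodeCiphertext, decodeCiphertext_alt]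
  set l := s.toList with hl
  set cols := PySem.Int.floordiv (PySem.List.len l) rows with hcols
  by_cases h : cols ≤ 0
  · rw [if_pos h, PySem.List.pyRange_one_eq_nil h, List.foldl_nil]
    rfl
  · rw [if_neg h]
    rw [core_eq l cols (by omega)]
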